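-- pv_equiv track=rewrite | github.com/pypi-data/pypi-mirror-403 | packages/dbt-autofix/dbt_autofix-0.18.7-py3-none-any.whl/packages/dbt_fusion_package_tools/src/dbt_fusion_package_tools/scripts/package_hub_fusion_compatibility.py | follow_redirects
-- ===== SOURCE A (Python) =====
-- from typing import Any, Dict, List, Optional
--
-- def follow_redirects(package_name: str, packages: dict[str, dict[str, Optional[str]]]) -> str:
--     package_redirect_name: Optional[str] = packages[package_name].get("package_redirect_name")
--     package_redirect_namespace: Optional[str] = packages[package_name].get("package_redirect_namespace")
--     # base case: package does not have any redirects
--     if not package_redirect_name and not package_redirect_namespace: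
--         return package_name
--     # recursive case: follow redirect
--     original_namespace = package_name.split("/")[0]
--     original_name = package_name.split("/")[1]
--     if package_redirect_name and package_redirect_namespace:
--         package_after_redirect: str = f"{package_redirect_namespace}/{package_redirect_name}"
--     elif package_redirect_name:
--         package_after_redirect: str = f"{original_namespace}/{package_redirect_name}"
--     else:
--         package_after_redirect: str = f"{package_redirect_namespace}/{original_name}"
--     next_redirect_name = follow_redirects(package_after_redirect, packages)
--     return next_redirect_name
-- ===== SOURCE B (Python) =====
-- def follow_redirects(package_name: str, packages: dict) -> str:
--     # Iterative version: walk the redirect chain with a loop instead of recursion.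
--     current = package_name
--     while True:
--         entry = packages[current]
--         redirect_name = entry.get("package_redirect_name")
--         redirect_namespace = entry.get("package_redirect_namespace")
--         if not redirect_name and not redirect_namespace:
--             return current
--         parts = current.split("/")
--         current = f"{redirect_namespace or parts[0]}/{redirect_name or parts[1]}"
-- ===== Notes on version B (the rewrite author's own statement) =====
-- stated objective: simpler
-- what changed: The recursive chain-follower becomes an iterative while-loop over a 'current' name, and A's three-way branch building the next name is merged into two independent 'redirect or original' choices for namespace and name.
import Mathlib
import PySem

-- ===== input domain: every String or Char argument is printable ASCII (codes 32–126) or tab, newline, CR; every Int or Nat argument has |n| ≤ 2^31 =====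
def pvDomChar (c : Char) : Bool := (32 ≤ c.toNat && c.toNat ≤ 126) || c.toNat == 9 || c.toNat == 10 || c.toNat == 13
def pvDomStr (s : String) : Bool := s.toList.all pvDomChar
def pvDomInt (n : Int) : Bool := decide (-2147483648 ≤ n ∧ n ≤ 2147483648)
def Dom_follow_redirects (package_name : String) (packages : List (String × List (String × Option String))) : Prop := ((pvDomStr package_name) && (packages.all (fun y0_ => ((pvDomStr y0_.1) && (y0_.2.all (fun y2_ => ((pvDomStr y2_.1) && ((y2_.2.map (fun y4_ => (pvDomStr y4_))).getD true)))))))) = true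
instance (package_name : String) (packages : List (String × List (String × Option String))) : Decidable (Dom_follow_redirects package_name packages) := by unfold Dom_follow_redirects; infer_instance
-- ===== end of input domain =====

-- B replaces A's recursion by an iterative loop and merges A's three-way redirect branch
-- into two 'x or y'-style choices (objective: simpler); same return value on Pre_.


-- Python truthiness of an Optional[str]: None and "" are falsy.
def pvTruthy (o : Option String) : Bool :=
  match o with
  | none => false
  | some s => !(s == "")

-- entry.get(k): None both when the key is absent and when it maps to None.
def pvGetOpt (entry : List (String × Option String)) (k : String) : Option String :=
  ((PySem.Dict.mk entry).get? k).join

-- s.split("/") (the separator is a fixed non-empty literal, so split? never returns none).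
def pvSplitSlash (s : String) : List String :=
  (PySem.Str.split? s "/").getD []

-- ===== PORT A =====
-- A is a recursive chain-follower; Lean needs fuel for the unbounded recursion.
-- fuel = packages.length + 1 suffices under Pre_ (the chain visits distinct keys);
-- the fuel-0 and missing-key/missing-'/' fallbacks are unreachable under Pre_
-- (in Python they are divergence / KeyError / IndexError, excluded by Pre_).
def followRedirectsGo (packages : List (String × List (String × Option String))) :
    Nat → String → String
  | 0, package_name => package_name
  | fuel + 1, package_name =>
    match (PySem.Dict.mk packages).get? package_name with
    | none => package_name
    | some entry =>
      let package_redirect_name := pvGetOpt entry "package_redirect_name"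
      let package_redirect_namespace := pvGetOpt entry "package_redirect_namespace"
      if !pvTruthy package_redirect_name && !pvTruthy package_redirect_namespace then
        package_name
      else
        let original_namespace := ((pvSplitSlash package_name)[0]?).getD ""
        let original_name := ((pvSplitSlash package_name)[1]?).getD ""
        let package_after_redirect :=
          if pvTruthy package_redirect_name && pvTruthy package_redirect_namespace then
            package_redirect_namespace.getD "" ++ "/" ++ package_redirect_name.getD ""
          else if pvTruthy package_redirect_name then
            original_namespace ++ "/" ++ package_redirect_name.getD ""
          else
            package_redirect_namespace.getD "" ++ "/" ++ original_name
        followRedirectsGo packages fuel package_after_redirect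

def follow_redirects (package_name : String) (packages : List (String × List (String × Option String))) : String :=
  followRedirectsGo packages (packages.length + 1) package_name

-- ===== PORT B =====
-- B is a while-True loop over 'current'; same fuel convention as A's port.
def followRedirectsLoop (packages : List (String × List (String × Option String))) :
    Nat → String → String
  | 0, current => current
  | fuel + 1, current =>
    match (PySem.Dict.mk packages).get? current with
    | none => current
    | some entry =>
      let redirect_name := pvGetOpt entry "package_redirect_name"
      let redirect_namespace := pvGetOpt entry "package_redirect_namespace"
      if !pvTruthy redirect_name && !pvTruthy redirect_namespace then
        current
      else
        let parts := pvSplitSlash current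
        followRedirectsLoop packages fuel
          ((if pvTruthy redirect_namespace then redirect_namespace.getD "" else (parts[0]?).getD "")
            ++ "/" ++
           (if pvTruthy redirect_name then redirect_name.getD "" else (parts[1]?).getD ""))

def follow_redirects_alt (package_name : String) (packages : List (String × List (String × Option String))) : String :=
  followRedirectsLoop packages (packages.length + 1) package_name

-- ===== PRECONDITION & SPEC =====
-- One redirect step as a graph edge on package names (none = no redirect or missing key).
def pvRedirectStep (packages : List (String × List (String × Option String))) (k : String) :
    Option String :=
  match (PySem.Dict.mk packages).get? k with
  | none => none
  | some entry =>
    let rn := pvGetOpt entry "package_redirect_name"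
    let rs := pvGetOpt entry "package_redirect_namespace"
    if pvTruthy rn || pvTruthy rs then
      let parts := pvSplitSlash k
      some ((if pvTruthy rs then rs.getD "" else (parts[0]?).getD "")
              ++ "/" ++
            (if pvTruthy rn then rn.getD "" else (parts[1]?).getD ""))
    else none

-- Whether the redirect chain starting at k reaches a terminal entry within the given
-- number of steps, with every lookup succeeding and every redirecting name containing '/'.
def pvChainOK (packages : List (String × List (String × Option String))) :
    Nat → String → Bool
  | 0, _ => false
  | n + 1, k =>
    match (PySem.Dict.mk packages).get? k with
    | none => false
    | some _ =>
      match pvRedirectStep packages k with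
      | none => true
      | some t => decide (2 ≤ (pvSplitSlash k).length) && pvChainOK packages n t

-- Pre_ is exactly the domain of Python A: it excludes the inputs where A raises KeyError
-- (a chain name that is not a key) or IndexError (a redirecting name without '/') or
-- diverges (the chain cycles); a terminating chain visits distinct keys, so
-- packages.length + 1 steps always suffice.
def Pre_follow_redirects (package_name : String) (packages : List (String × List (String × Option String))) : Prop :=
  pvChainOK packages (packages.length + 1) package_name = true

instance (package_name : String) (packages : List (String × List (String × Option String))) : Decidable (Pre_follow_redirects package_name packages) := by
  unfold Pre_follow_redirects; infer_instance

def pvWitness_follow_redirects : String × (List (String × List (String × Option String))) :=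
  ("ns/a", [("ns/a", [("package_redirect_name", some "b")]), ("ns/b", [])])

def Spec_follow_redirects (package_name : String) (packages : List (String × List (String × Option String))) (out : String) : Prop := out = follow_redirects_alt package_name packages
instance (package_name : String) (packages : List (String × List (String × Option String))) (out : String) : Decidable (Spec_follow_redirects package_name packages out) := by unfold Spec_follow_redirects; infer_instance

-- ===== CLAIM (what is proved, stated in full; the proofs are below) =====
def Claim_equal_follow_redirects : Prop := ∀ (package_name : String) (packages : List (String × List (String × Option String))), Dom_follow_redirects package_name packages → Pre_follow_redirects package_name packages → Spec_follow_redirects package_name packages (follow_redirects package_name packages)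

-- ===== LEMMAS AND PROOFS =====
-- The two ports agree step for step, for every fuel and start name (the loop and the
-- recursion carry the same state; the three-way branch and the merged branch build the
-- same next name).
theorem followGo_eq_loop (packages : List (String × List (String × Option String)))
    (fuel : Nat) (name : String) :
    followRedirectsGo packages fuel name = followRedirectsLoop packages fuel name := by
  induction fuel generalizing name with
  | zero => rfl
  | succ fuel ih =>
    unfold followRedirectsGo followRedirectsLoop
    cases h : (PySem.Dict.mk packages).get? name with
    | none => rfl
    | some entry =>
      simp only
      by_cases hn : pvTruthy (pvGetOpt entry "package_redirect_name") = true <;>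
        by_cases hs : pvTruthy (pvGetOpt entry "package_redirect_namespace") = true <;>
        simp [hn, hs, ih]

-- ===== VERDICT (by name: the statement is the Claim_ definition above) =====
theorem follow_redirects_spec : Claim_equal_follow_redirects := by
  intro package_name packages _ _
  unfold Spec_follow_redirects follow_redirects follow_redirects_alt
  exact followGo_eq_loop packages (packages.length + 1) package_name
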